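-- pv_equiv track=rewrite | github.com/petercollingridge/code-for-blog | language/vowel_variants.py | get_letter_to_letter_swaps
-- ===== SOURCE A (Python) =====
-- from collections import defaultdict, Counter
-- from string import ascii_lowercase
--
-- def get_letter_to_letter_swaps(words):
--     """
--     Given a list of words, return a dict that maps pairs of letters to a
--     list of word pairs, where those two letters are swapped.
--     """
--
--     letter_swaps = { letter: defaultdict(list) for letter in ascii_lowercase }
--
--     for word in words:
--         for index, letter in enumerate(word):
--             for new_letter in ascii_lowercase[ascii_lowercase.index(letter) + 1:]:
--                 new_word = word[:index] + new_letter + word[index + 1:]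
--                 if new_word in words:
--                     letter_swaps[letter][new_letter].append((word, new_word))
--                     letter_swaps[new_letter][letter].append((word, new_word))
--
--     return letter_swaps
-- ===== SOURCE B (Python) =====
-- from collections import defaultdict
-- from string import ascii_lowercase
--
-- def get_letter_to_letter_swaps(words):
--     """
--     Given a list of words, return a dict that maps pairs of letters to a
--     list of word pairs, where those two letters are swapped.
--     """
--     # First pass: index each (position, word-with-that-position-deleted) pattern
--     # by the set of letters occurring there, so the second pass needs no scan of
--     # `words` per candidate letter.
--     patterns = defaultdict(set)
--     for word in words:
--         for i, letter in enumerate(word):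
--             patterns[(i, word[:i] + word[i + 1:])].add(letter)
--
--     letter_swaps = {letter: defaultdict(list) for letter in ascii_lowercase}
--
--     for word in words:
--         for i, letter in enumerate(word):
--             candidates = patterns[(i, word[:i] + word[i + 1:])]
--             for new_letter in ascii_lowercase[ascii_lowercase.index(letter) + 1:]:
--                 if new_letter in candidates:
--                     new_word = word[:i] + new_letter + word[i + 1:]
--                     letter_swaps[letter][new_letter].append((word, new_word))
--                     letter_swaps[new_letter][letter].append((word, new_word))
--
--     return letter_swaps
-- ===== Notes on version B (the rewrite author's own statement) =====
-- stated objective: faster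
-- what changed: B adds a first pass building an index from (position, word-with-that-position-deleted) patterns to the set of letters occurring there; the second pass then tests each candidate letter against that set, so the per-candidate linear `new_word in words` scan (and the word reconstruction for misses) disappears.
import Mathlib
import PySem

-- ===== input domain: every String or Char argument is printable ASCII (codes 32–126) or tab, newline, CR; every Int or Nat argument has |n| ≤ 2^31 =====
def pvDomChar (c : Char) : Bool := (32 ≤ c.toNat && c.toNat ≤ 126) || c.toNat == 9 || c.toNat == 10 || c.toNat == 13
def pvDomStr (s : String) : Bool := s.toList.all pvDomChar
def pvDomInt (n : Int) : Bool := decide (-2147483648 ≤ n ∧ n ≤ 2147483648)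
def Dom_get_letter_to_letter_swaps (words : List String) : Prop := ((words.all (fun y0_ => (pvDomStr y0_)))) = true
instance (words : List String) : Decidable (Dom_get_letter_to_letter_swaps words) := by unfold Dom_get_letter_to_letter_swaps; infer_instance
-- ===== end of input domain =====

-- B replaces A's inner `new_word in words` linear scan by a precomputed index from
-- (position, word-with-that-position-deleted) patterns to the set of letters seen there
-- (objective: faster; a timing run measures the speed-up).

-- ===== PORT A =====
-- string.ascii_lowercase
def pvAscii : List Char :=
  ['a','b','c','d','e','f','g','h','i','j','k','l','m','n','o','p','q','r','s','t','u','v','w','x','y','z']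

-- the letter_swaps accumulator: {letter: {other_letter: [(word, new_word), ...]}}
abbrev pvLS := PySem.Dict String (PySem.Dict String (List (String × String)))

-- the two identical append lines of A and B:
--   letter_swaps[letter][new_letter].append((word, new_word))
--   letter_swaps[new_letter][letter].append((word, new_word))
-- (outer access letter_swaps[letter] is a plain dict lookup; under Pre_ the key is
-- always present, so getD with a dummy default is exact there)
def pvAddSwap (ls : pvLS) (letter new_letter : Char) (word new_word : String) : pvLS :=
  let ls := ls.insert (String.ofList [letter])
      ((ls.getD (String.ofList [letter]) PySem.Dict.empty).modify
        (String.ofList [new_letter]) [] (fun l => l ++ [(word, new_word)]))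
  ls.insert (String.ofList [new_letter])
      ((ls.getD (String.ofList [new_letter]) PySem.Dict.empty).modify
        (String.ofList [letter]) [] (fun l => l ++ [(word, new_word)]))

-- { letter: defaultdict(list) for letter in ascii_lowercase }
def pvInitSwaps : pvLS :=
  pvAscii.foldl (fun d c => d.insert (String.ofList [c]) PySem.Dict.empty) PySem.Dict.empty

-- new_word = word[:index] + new_letter + word[index + 1:]
def pvNewWord (word : String) (index : Int) (new_letter : Char) : String :=
  String.ofList (PySem.List.slice word.toList none (some index) ++ [new_letter] ++
                 PySem.List.slice word.toList (some (index + 1)) none)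

def get_letter_to_letter_swaps (words : List String) : List (String × List (String × List (String × String))) :=
  let final := words.foldl (fun ls word =>
    (PySem.List.enumerate word.toList).foldl (fun ls p =>
      match PySem.List.index? pvAscii p.2 with
      | none => ls   -- ascii_lowercase.index(letter) raises ValueError: excluded by Pre_
      | some idx =>
        (PySem.List.slice pvAscii (some ((idx : Int) + 1)) none).foldl (fun ls new_letter =>
          let new_word := pvNewWord word p.1 new_letter
          if words.contains new_word then pvAddSwap ls p.2 new_letter word new_word else ls)
          ls) ls) pvInitSwaps
  final.items.map (fun q => (q.1, q.2.items))

-- ===== PORT B =====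
-- the pattern key (i, word[:i] + word[i+1:])
def pvKey (word : String) (i : Int) : Int × String :=
  (i, String.ofList (PySem.List.slice word.toList none (some i) ++
                     PySem.List.slice word.toList (some (i + 1)) none))

-- first pass: patterns = defaultdict(set); patterns[(i, word[:i]+word[i+1:])].add(letter)
def pvPatterns (words : List String) : PySem.Dict (Int × String) (PySem.Set Char) :=
  words.foldl (fun d word =>
    (PySem.List.enumerate word.toList).foldl (fun d p =>
      d.modify (pvKey word p.1) PySem.Set.empty (fun s => PySem.Set.add s p.2)) d)
    PySem.Dict.empty

def get_letter_to_letter_swaps_alt (words : List String) : List (String × List (String × List (String × String))) :=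
  let patterns := pvPatterns words
  let final := words.foldl (fun ls word =>
    (PySem.List.enumerate word.toList).foldl (fun ls p =>
      let candidates := patterns.getD (pvKey word p.1) PySem.Set.empty
      match PySem.List.index? pvAscii p.2 with
      | none => ls   -- ascii_lowercase.index(letter) raises ValueError: excluded by Pre_
      | some idx =>
        (PySem.List.slice pvAscii (some ((idx : Int) + 1)) none).foldl (fun ls new_letter =>
          if PySem.Set.contains candidates new_letter then
            let new_word := pvNewWord word p.1 new_letter
            pvAddSwap ls p.2 new_letter word new_word
          else ls) ls) ls) pvInitSwaps
  final.items.map (fun q => (q.1, q.2.items))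

-- ===== PRECONDITION & SPEC =====
-- Pre_ excludes exactly the inputs where some word contains a character outside a-z:
-- there A raises ValueError at ascii_lowercase.index(letter).
def Pre_get_letter_to_letter_swaps (words : List String) : Prop :=
  words.all (fun w => w.toList.all (fun c => pvAscii.contains c)) = true

instance (words : List String) : Decidable (Pre_get_letter_to_letter_swaps words) := by
  unfold Pre_get_letter_to_letter_swaps; infer_instance

def pvWitness_get_letter_to_letter_swaps : List String := ["cat", "cot"]

def Spec_get_letter_to_letter_swaps (words : List String) (out : List (String × List (String × List (String × String)))) : Prop := out = get_letter_to_letter_swaps_alt words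
instance (words : List String) (out : List (String × List (String × List (String × String)))) : Decidable (Spec_get_letter_to_letter_swaps words out) := by unfold Spec_get_letter_to_letter_swaps; infer_instance

-- ===== CLAIM (what is proved, stated in full; the proofs are below) =====
def Claim_equal_get_letter_to_letter_swaps : Prop := ∀ (words : List String), Dom_get_letter_to_letter_swaps words → Pre_get_letter_to_letter_swaps words → Spec_get_letter_to_letter_swaps words (get_letter_to_letter_swaps words)

-- ===== LEMMAS AND PROOFS =====

-- items of the two nested first-pass loops, flattened
def pvItems (words : List String) : List (String × (Int × Char)) :=
  words.flatMap (fun w => (PySem.List.enumerate w.toList).map (fun p => (w, p)))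

-- the first-pass step on a flattened item
def pvStep (d : PySem.Dict (Int × String) (PySem.Set Char)) (q : String × (Int × Char)) :
    PySem.Dict (Int × String) (PySem.Set Char) :=
  d.modify (pvKey q.1 q.2.1) PySem.Set.empty (fun s => PySem.Set.add s q.2.2)

-- the first pass is the fold of its step over the flattened items
theorem pvPatterns_eq_foldl_items (words : List String) :
    pvPatterns words = (pvItems words).foldl pvStep PySem.Dict.empty := by
  unfold pvPatterns pvItems
  generalize (PySem.Dict.empty : PySem.Dict (Int × String) (PySem.Set Char)) = d
  induction words generalizing d with
  | nil => rfl
  | cons w ws ih =>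
      simp only [List.foldl_cons, List.flatMap_cons, List.foldl_append, List.foldl_map]
      exact ih _

-- membership in a pattern set after the fold
theorem pvMem_getD_foldl (l : List (String × (Int × Char)))
    (d : PySem.Dict (Int × String) (PySem.Set Char)) (k : Int × String) (c : Char) :
    (c ∈ (l.foldl pvStep d).getD k PySem.Set.empty) ↔
      c ∈ d.getD k PySem.Set.empty ∨ ∃ q ∈ l, pvKey q.1 q.2.1 = k ∧ q.2.2 = c := by
  induction l generalizing d with
  | nil => simp
  | cons q l ih =>
      rw [List.foldl_cons, ih]
      unfold pvStep
      rw [PySem.Dict.getD_modify]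
      simp only [List.mem_cons]
      by_cases h : k = pvKey q.1 q.2.1
      · subst h
        rw [if_pos rfl, PySem.Set.mem_add]
        constructor
        · rintro (⟨hm | hc⟩ | ⟨q', hq', hk', hc'⟩)
          · exact Or.inl hm
          · exact Or.inr ⟨q, Or.inl rfl, rfl, hc.symm⟩
          · exact Or.inr ⟨q', Or.inr hq', hk', hc'⟩
        · rintro (hm | ⟨q', hq'' | hq', hk', hc'⟩)
          · exact Or.inl (Or.inl hm)
          · subst hq''; exact Or.inl (Or.inr hc'.symm)
          · exact Or.inr ⟨q', hq', hk', hc'⟩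
      · rw [if_neg h]
        constructor
        · rintro (hm | ⟨q', hq', hk', hc'⟩)
          · exact Or.inl hm
          · exact Or.inr ⟨q', Or.inr hq', hk', hc'⟩
        · rintro (hm | ⟨q', hq'' | hq', hk', hc'⟩)
          · exact Or.inl hm
          · exact absurd (hq'' ▸ hk').symm h
          · exact Or.inr ⟨q', hq', hk', hc'⟩

-- membership in the flattened items
theorem pvMem_items_iff (words : List String) (q : String × (Int × Char)) :
    q ∈ pvItems words ↔ ∃ w ∈ words, ∃ k : Nat, ∃ _ : k < w.toList.length,
      q = (w, ((k : Int), w.toList[k])) := by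
  unfold pvItems
  simp only [List.mem_flatMap, List.mem_map, PySem.List.mem_enumerate_iff]
  constructor
  · rintro ⟨w, hw, p, ⟨k, hk, rfl⟩, rfl⟩
    exact ⟨w, hw, k, hk, by simp⟩
  · rintro ⟨w, hw, k, hk, rfl⟩
    exact ⟨w, hw, ((k : Int), w.toList[k]), ⟨k, hk, by simp⟩, rfl⟩

-- u = u.take k ++ u[k] :: u.drop (k+1)
theorem pvDecomp (u : List Char) (k : Nat) (h : k < u.length) :
    u = u.take k ++ u[k] :: u.drop (k + 1) := by
  conv_lhs => rw [← List.take_append_drop k u, List.drop_eq_getElem_cons h]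

-- the pattern key written with take/drop
theorem pvKey_natCast (w : String) (k : Nat) :
    pvKey w (k : Int) = ((k : Int),
      String.ofList (w.toList.take k ++ w.toList.drop (k + 1))) := by
  unfold pvKey
  rw [PySem.List.slice_to_natCast]
  have : ((k : Int) + 1) = ((k + 1 : Nat) : Int) := by push_cast; ring
  rw [this, PySem.List.slice_from_natCast]

-- new_word written with take/drop
theorem pvNewWord_natCast (w : String) (k : Nat) (c : Char) :
    pvNewWord w (k : Int) c =
      String.ofList (w.toList.take k ++ c :: w.toList.drop (k + 1)) := by
  unfold pvNewWord
  rw [PySem.List.slice_to_natCast]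
  have : ((k : Int) + 1) = ((k + 1 : Nat) : Int) := by push_cast; ring
  rw [this, PySem.List.slice_from_natCast]
  simp

-- the key characterization: a letter is in a pattern set iff the rebuilt word is in words
theorem pvMem_pattern_iff (words : List String) (wl : List Char) (k : Nat)
    (hk : k < wl.length) (c : Char) :
    ((∃ w ∈ words, ∃ j : Nat, ∃ _ : j < w.toList.length,
        pvKey w (j : Int) = ((k : Int), String.ofList (wl.take k ++ wl.drop (k + 1)))
          ∧ w.toList[j] = c)
      ↔ String.ofList (wl.take k ++ c :: wl.drop (k + 1)) ∈ words) := by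
  have hlt : (wl.take k).length = k := by simp; omega
  constructor
  · rintro ⟨w, hw, j, hj, hkey, hc⟩
    rw [pvKey_natCast, Prod.mk.injEq] at hkey
    obtain ⟨hjk, hpat⟩ := hkey
    have hjk' : j = k := by exact_mod_cast hjk
    subst hjk'
    rw [String.ofList_inj] at hpat
    have h1 : (w.toList.take j).length = (wl.take j).length := by
      simp only [List.length_take]
      omega
    obtain ⟨ht, hd⟩ := List.append_inj hpat h1
    have : String.ofList (wl.take j ++ c :: wl.drop (j + 1)) = w := by
      rw [← ht, ← hd, ← hc, ← pvDecomp w.toList j hj]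
      exact String.ofList_toList
    rwa [this]
  · intro hmem
    have h1 : (wl.take k ++ c :: wl.drop (k + 1)).take k = wl.take k :=
      List.take_left' hlt
    have h2 : (wl.take k ++ c :: wl.drop (k + 1)).drop (k + 1) = wl.drop (k + 1) := by
      have hl1 : (wl.take k ++ [c]).length = k + 1 := by simp [hlt]
      have hass : wl.take k ++ c :: wl.drop (k + 1)
          = (wl.take k ++ [c]) ++ wl.drop (k + 1) := by simp
      rw [hass, List.drop_left' hl1]
    refine ⟨String.ofList (wl.take k ++ c :: wl.drop (k + 1)), hmem, k, ?_, ?_, ?_⟩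
    · rw [String.toList_ofList]
      simp only [List.length_append, List.length_cons, hlt]
      omega
    · rw [pvKey_natCast, Prod.mk.injEq]
      refine ⟨rfl, ?_⟩
      rw [String.ofList_inj, String.toList_ofList, h1, h2]
    · simp only [String.toList_ofList]
      exact List.getElem_of_append rfl hlt

-- per-position: the filtered candidate lists of the two inner loops coincide
theorem pvFilters_eq (words : List String) (word : String) (k : Nat)
    (hk : k < word.toList.length) (l : List Char) :
    l.filter (fun nl => words.contains (pvNewWord word (k : Int) nl))
      = l.filter (fun nl => PySem.Set.contains
          ((pvPatterns words).getD (pvKey word (k : Int)) PySem.Set.empty) nl) := by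
  set S := (pvPatterns words).getD (pvKey word (k : Int)) PySem.Set.empty with hSdef
  have hmemS : ∀ c, c ∈ S ↔ String.ofList (word.toList.take k ++ c :: word.toList.drop (k + 1)) ∈ words := by
    intro c
    rw [hSdef, pvPatterns_eq_foldl_items, pvMem_getD_foldl]
    simp only [PySem.Dict.getD_empty]
    rw [← pvMem_pattern_iff words word.toList k hk c]
    constructor
    · rintro (h | ⟨q, hq, hkey, hc⟩)
      · cases h
      · rw [pvMem_items_iff] at hq
        obtain ⟨w, hw', j, hj, rfl⟩ := hq
        exact ⟨w, hw', j, hj, by rw [← pvKey_natCast word k]; exact hkey, hc⟩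
    · rintro ⟨w, hw', j, hj, hkey, hc⟩
      refine Or.inr ⟨(w, ((j : Int), w.toList[j])), ?_, ?_, hc⟩
      · rw [pvMem_items_iff]; exact ⟨w, hw', j, hj, rfl⟩
      · rw [pvKey_natCast word k]; exact hkey
  apply List.filter_congr
  intro c _
  rw [List.contains_eq_mem, pvNewWord_natCast, PySem.Set.contains_eq_listContains,
      List.contains_eq_mem]
  simp only [decide_eq_decide]
  exact (hmemS c).symm

-- ===== VERDICT (by name: the statement is the Claim_ definition above) =====
theorem get_letter_to_letter_swaps_spec : Claim_equal_get_letter_to_letter_swaps := by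
  intro words _ _
  unfold Spec_get_letter_to_letter_swaps get_letter_to_letter_swaps get_letter_to_letter_swaps_alt
  have hfold : words.foldl (fun ls word =>
      (PySem.List.enumerate word.toList).foldl (fun ls p =>
        match PySem.List.index? pvAscii p.2 with
        | none => ls
        | some idx =>
          (PySem.List.slice pvAscii (some ((idx : Int) + 1)) none).foldl (fun ls new_letter =>
            let new_word := pvNewWord word p.1 new_letter
            if words.contains new_word then pvAddSwap ls p.2 new_letter word new_word else ls)
            ls) ls) pvInitSwaps
    = words.foldl (fun ls word =>
      (PySem.List.enumerate word.toList).foldl (fun ls p =>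
        let candidates := (pvPatterns words).getD (pvKey word p.1) PySem.Set.empty
        match PySem.List.index? pvAscii p.2 with
        | none => ls
        | some idx =>
          (PySem.List.slice pvAscii (some ((idx : Int) + 1)) none).foldl (fun ls new_letter =>
            if PySem.Set.contains candidates new_letter then
              let new_word := pvNewWord word p.1 new_letter
              pvAddSwap ls p.2 new_letter word new_word
            else ls) ls) ls) pvInitSwaps := by
    apply PySem.List.foldl_congr_mem'
    intro word _hw ls0
    apply PySem.List.foldl_congr_mem'
    intro p hp ls
    rw [PySem.List.mem_enumerate_iff] at hp
    obtain ⟨k, hk, rfl⟩ := hp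
    simp only [zero_add]
    cases hidx : PySem.List.index? pvAscii word.toList[k] with
    | none => rfl
    | some idx =>
        show (PySem.List.slice pvAscii (some ((idx : Int) + 1)) none).foldl
            (fun ls new_letter =>
              if words.contains (pvNewWord word (k : Int) new_letter) then
                pvAddSwap ls word.toList[k] new_letter word (pvNewWord word (k : Int) new_letter)
              else ls) ls
          = (PySem.List.slice pvAscii (some ((idx : Int) + 1)) none).foldl
            (fun ls new_letter =>
              if PySem.Set.contains
                  ((pvPatterns words).getD (pvKey word (k : Int)) PySem.Set.empty) new_letter then
                pvAddSwap ls word.toList[k] new_letter word (pvNewWord word (k : Int) new_letter)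
              else ls) ls
        rw [PySem.List.foldl_if_eq_foldl_filter
              (fun nl => words.contains (pvNewWord word (k : Int) nl))
              (fun ls nl => pvAddSwap ls word.toList[k] nl word (pvNewWord word (k : Int) nl)),
            PySem.List.foldl_if_eq_foldl_filter
              (fun nl => PySem.Set.contains
                ((pvPatterns words).getD (pvKey word (k : Int)) PySem.Set.empty) nl)
              (fun ls nl => pvAddSwap ls word.toList[k] nl word (pvNewWord word (k : Int) nl)),
            pvFilters_eq words word k hk]
  rw [hfold]
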